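-- pv_equiv track=rewrite | github.com/nsheldon/MIDI-File-Examiner | midi_examiner.py | _assemble_karaoke_lines
-- ===== SOURCE A (Python) =====
-- def _assemble_karaoke_lines(raw_texts):
--     """Assemble a list of raw karaoke syllable strings into (is_para, line) pairs.
--
--     Syllables starting with \\ begin a new paragraph (blank line before the
--     line they start); syllables starting with / begin a new line within the
--     current paragraph (no blank line).
--
--     The is_para flag is carried forward and attached to the line being
--     *started*, not to the line being flushed, so blank lines appear in the
--     right place.
--
--     Returns a list of (is_paragraph_break, assembled_line) tuples, or an
--     empty list if no line-break markers are present.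
--     """
--     if not any(t.startswith("\\") or t.startswith("/") for t in raw_texts):
--         return []
--     lines = []
--     current = ""
--     next_is_para = False
--     first = True
--     for text in raw_texts:
--         if text.startswith("\\") or text.startswith("/"):
--             if current.strip() or not first:
--                 lines.append((next_is_para, current.rstrip()))
--             next_is_para = text.startswith("\\")
--             current = text[1:]
--             first = False
--         else:
--             current += text
--     if current.strip():
--         lines.append((next_is_para, current.rstrip()))
--     return lines
-- ===== SOURCE B (Python) =====
-- def _assemble_karaoke_lines(raw_texts):
--     """Partition-then-emit rewrite: one pass groups the syllables into a
--     leading chunk plus one (para_flag, content) segment per marker token,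
--     a second pass flushes them (leading/last only when non-blank)."""
--     segments = []      # [para_flag, content] per marker token, in order
--     lead_parts = []    # tokens before the first marker
--     for t in raw_texts:
--         if t.startswith("\\") or t.startswith("/"):
--             segments.append([t.startswith("\\"), t[1:]])
--         elif segments:
--             segments[-1][1] += t
--         else:
--             lead_parts.append(t)
--     if not segments:
--         return []
--     out = []
--     lead = "".join(lead_parts)
--     if lead.strip():
--         out.append((False, lead.rstrip()))
--     out.extend((p, c.rstrip()) for p, c in segments[:-1])
--     p, c = segments[-1]
--     if c.strip():
--         out.append((p, c.rstrip()))
--     return out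
-- ===== Notes on version B (the rewrite author's own statement) =====
-- stated objective: alternative
-- what changed: A's single flush-on-marker state machine (current line, carried para flag, first flag, flush before each marker and at the end) is replaced by a partition pass that groups the tokens into a leading chunk plus one (para_flag, content) segment per marker token, followed by a separate emit pass that flushes the leading and final segments only when non-blank and every middle segment unconditionally.
import Mathlib
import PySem

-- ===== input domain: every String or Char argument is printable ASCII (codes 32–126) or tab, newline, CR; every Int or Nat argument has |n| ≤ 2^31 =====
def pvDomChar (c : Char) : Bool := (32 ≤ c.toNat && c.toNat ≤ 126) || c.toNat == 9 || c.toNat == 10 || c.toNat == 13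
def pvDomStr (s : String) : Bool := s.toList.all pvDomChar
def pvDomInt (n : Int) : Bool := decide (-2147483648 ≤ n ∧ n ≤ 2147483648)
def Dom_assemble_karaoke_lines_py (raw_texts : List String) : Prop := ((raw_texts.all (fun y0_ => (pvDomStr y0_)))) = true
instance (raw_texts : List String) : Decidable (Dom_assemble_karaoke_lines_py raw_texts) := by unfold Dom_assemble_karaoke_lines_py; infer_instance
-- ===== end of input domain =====

-- B regroups A's flush-on-marker state machine into a partition pass (leading chunk +
-- one segment per marker) followed by an emit pass; same return value, alternative structure.

-- ===== PORT A =====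
-- A's for-loop, as structural recursion over the same state (lines, current, next_is_para, first);
-- returns the state the loop ends with (the 'first' flag is dead after the loop and dropped).
def pvLoopA : List String → List (Bool × String) → String → Bool → Bool →
    List (Bool × String) × String × Bool
  | [], lines, current, para, _ => (lines, current, para)
  | t :: ts, lines, current, para, first =>
    if PySem.Str.startswith t "\\" || PySem.Str.startswith t "/" then
      pvLoopA ts
        (if (PySem.Str.strip current != "") || !first then
           lines ++ [(para, PySem.Str.rstrip current)] else lines)
        (PySem.Str.slice t (some 1) none) (PySem.Str.startswith t "\\") false
    else
      pvLoopA ts lines (current ++ t) para first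

def assemble_karaoke_lines_py (raw_texts : List String) : List (Bool × String) :=
  if !(raw_texts.any fun t => PySem.Str.startswith t "\\" || PySem.Str.startswith t "/") then
    []
  else
    match pvLoopA raw_texts [] "" false true with
    | (lines, current, para) =>
      if PySem.Str.strip current != "" then lines ++ [(para, PySem.Str.rstrip current)]
      else lines

-- ===== PORT B =====
-- B's partition loop body: a marker token opens a new segment; otherwise the token is
-- appended to the last segment's content if one exists ('elif segments'), else to lead_parts.
def pvStepB (st : List (Bool × String) × List String) (t : String) :
    List (Bool × String) × List String :=
  if PySem.Str.startswith t "\\" || PySem.Str.startswith t "/" then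
    (st.1 ++ [(PySem.Str.startswith t "\\", PySem.Str.slice t (some 1) none)], st.2)
  else
    match st.1.getLast? with
    | some pc => (st.1.dropLast ++ [(pc.1, pc.2 ++ t)], st.2)  -- segments[-1][1] += t
    | none => (st.1, st.2 ++ [t])

def assemble_karaoke_lines_py_alt (raw_texts : List String) : List (Bool × String) :=
  let st := raw_texts.foldl pvStepB ([], [])
  match st.1.getLast? with
  | none => []                                    -- 'if not segments: return []'
  | some (p, c) =>
    -- ''.join(lead_parts): empty-separator join = left-fold concatenation (exact)
    let lead := st.2.foldl (· ++ ·) ""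
    (if PySem.Str.strip lead != "" then [(false, PySem.Str.rstrip lead)] else [])
    ++ (st.1.dropLast.map fun pc => (pc.1, PySem.Str.rstrip pc.2))
    ++ (if PySem.Str.strip c != "" then [(p, PySem.Str.rstrip c)] else [])

-- ===== PRECONDITION & SPEC =====
def Spec_assemble_karaoke_lines_py (raw_texts : List String) (out : List (Bool × String)) : Prop := out = assemble_karaoke_lines_py_alt raw_texts
instance (raw_texts : List String) (out : List (Bool × String)) : Decidable (Spec_assemble_karaoke_lines_py raw_texts out) := by unfold Spec_assemble_karaoke_lines_py; infer_instance

-- ===== CLAIM (what is proved, stated in full; the proofs are below) =====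
def Claim_equal_assemble_karaoke_lines_py : Prop := ∀ (raw_texts : List String), Dom_assemble_karaoke_lines_py raw_texts → Spec_assemble_karaoke_lines_py raw_texts (assemble_karaoke_lines_py raw_texts)

-- ===== LEMMAS AND PROOFS =====

-- marker test shared by the proofs (each port spells it out inline)
def pvMark (t : String) : Bool :=
  PySem.Str.startswith t "\\" || PySem.Str.startswith t "/"

-- what both programs compute from the first marker token on: one (flag, line) per segment,
-- the last one only when non-blank
def pvEmitFrom (p : Bool) (c : String) : List String → List (Bool × String)
  | [] => if PySem.Str.strip c != "" then [(p, PySem.Str.rstrip c)] else []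
  | t :: ts =>
    if pvMark t then
      (p, PySem.Str.rstrip c) ::
        pvEmitFrom (PySem.Str.startswith t "\\") (PySem.Str.slice t (some 1) none) ts
    else pvEmitFrom p (c ++ t) ts

-- B's segments from the first marker token on
def pvSegFrom (p : Bool) (c : String) : List String → List (Bool × String)
  | [] => [(p, c)]
  | t :: ts =>
    if pvMark t then
      (p, c) :: pvSegFrom (PySem.Str.startswith t "\\") (PySem.Str.slice t (some 1) none) ts
    else pvSegFrom p (c ++ t) ts

-- B's emit pass over a segment list
def pvEmitB (segs : List (Bool × String)) : List (Bool × String) :=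
  match segs.getLast? with
  | none => []
  | some (p, c) =>
    (segs.dropLast.map fun pc => (pc.1, PySem.Str.rstrip pc.2))
    ++ (if PySem.Str.strip c != "" then [(p, PySem.Str.rstrip c)] else [])

-- A's trailing flush applied to the loop's final state
def pvFinishA (st : List (Bool × String) × String × Bool) : List (Bool × String) :=
  if PySem.Str.strip st.2.1 != "" then st.1 ++ [(st.2.2, PySem.Str.rstrip st.2.1)] else st.1

theorem pvLoopA_emit (ts : List String) : ∀ (lines : List (Bool × String)) (c : String) (p : Bool),
    pvFinishA (pvLoopA ts lines c p false) = lines ++ pvEmitFrom p c ts := by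
  induction ts with
  | nil => intro lines c p; simp [pvLoopA, pvEmitFrom, pvFinishA]; split <;> simp
  | cons t ts ih =>
    intro lines c p
    by_cases h : (PySem.Str.startswith t "\\" || PySem.Str.startswith t "/") = true
    · have hm : pvMark t = true := h
      simp at h
      simp only [pvLoopA, pvEmitFrom, hm, if_true, Bool.not_false, Bool.or_true]
      simp [h, ih]
    · have hm : pvMark t = false := Bool.eq_false_iff.mpr h
      simp at h
      simp only [pvLoopA, pvEmitFrom, hm, Bool.false_eq_true, if_false]
      simp [h, ih]

theorem pvStepB_group (ts : List String) :
    ∀ (segs : List (Bool × String)) (p : Bool) (c : String) (parts : List String),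
    List.foldl pvStepB (segs ++ [(p, c)], parts) ts = (segs ++ pvSegFrom p c ts, parts) := by
  induction ts with
  | nil => intro segs p c parts; simp [pvSegFrom]
  | cons t ts ih =>
    intro segs p c parts
    by_cases h : (PySem.Str.startswith t "\\" || PySem.Str.startswith t "/") = true
    · have hm : pvMark t = true := h
      simp at h
      simp only [List.foldl_cons, pvSegFrom, hm, if_true]
      rw [show pvStepB (segs ++ [(p, c)], parts) t
            = ((segs ++ [(p, c)]) ++ [(PySem.Str.startswith t "\\", PySem.Str.slice t (some 1) none)], parts) by
          simp [pvStepB, h]]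
      rw [ih]
      simp
    · have hm : pvMark t = false := Bool.eq_false_iff.mpr h
      simp at h
      simp only [List.foldl_cons, pvSegFrom, hm, Bool.false_eq_true, if_false]
      rw [show pvStepB (segs ++ [(p, c)], parts) t = (segs ++ [(p, c ++ t)], parts) by
          simp [pvStepB, h]]
      exact ih segs p (c ++ t) parts

theorem pvSegFrom_ne_nil (ts : List String) : ∀ (p : Bool) (c : String),
    pvSegFrom p c ts ≠ [] := by
  induction ts with
  | nil => intro p c; simp [pvSegFrom]
  | cons t ts ih =>
    intro p c
    by_cases h : pvMark t = true <;> simp [pvSegFrom, h, ih]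

theorem pvEmitB_seg (ts : List String) : ∀ (p : Bool) (c : String),
    pvEmitB (pvSegFrom p c ts) = pvEmitFrom p c ts := by
  induction ts with
  | nil => intro p c; simp [pvSegFrom, pvEmitFrom, pvEmitB]
  | cons t ts ih =>
    intro p c
    by_cases h : pvMark t = true
    · simp only [pvSegFrom, pvEmitFrom, h, if_true]
      obtain ⟨y, l', hseg⟩ := List.exists_cons_of_ne_nil
        (pvSegFrom_ne_nil ts (PySem.Str.startswith t "\\") (PySem.Str.slice t (some 1) none))
      rw [← ih]
      unfold pvEmitB
      rw [hseg, List.getLast?_cons_cons, List.dropLast_cons₂]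
      match hL : (y :: l').getLast? with
      | none => simp at hL
      | some pc => simp
    · have hm : pvMark t = false := Bool.eq_false_iff.mpr h
      simp [pvSegFrom, pvEmitFrom, hm, ih]

-- the pre-marker phase, relating both programs token by token
theorem pv_main (raw : List String) : ∀ (parts : List String),
    (if !(raw.any fun t => PySem.Str.startswith t "\\" || PySem.Str.startswith t "/") then
       ([] : List (Bool × String))
     else pvFinishA (pvLoopA raw [] (parts.foldl (· ++ ·) "") false true)) =
    (match (List.foldl pvStepB (([] : List (Bool × String)), parts) raw).1.getLast? with
     | none => []
     | some (p, c) =>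
       (if PySem.Str.strip ((List.foldl pvStepB (([] : List (Bool × String)), parts) raw).2.foldl (· ++ ·) "") != ""
        then [(false, PySem.Str.rstrip ((List.foldl pvStepB (([] : List (Bool × String)), parts) raw).2.foldl (· ++ ·) ""))] else [])
       ++ ((List.foldl pvStepB (([] : List (Bool × String)), parts) raw).1.dropLast.map
             fun pc => (pc.1, PySem.Str.rstrip pc.2))
       ++ (if PySem.Str.strip c != "" then [(p, PySem.Str.rstrip c)] else [])) := by
  induction raw with
  | nil => intro parts; simp
  | cons t ts ih =>
    intro parts
    by_cases h : (PySem.Str.startswith t "\\" || PySem.Str.startswith t "/") = true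
    · have hm : pvMark t = true := h
      have h0 := h
      simp at h
      -- A takes the marker branch with first = true, flushing the lead only if non-blank
      simp only [List.any_cons, h0, List.foldl_cons, Bool.true_or, Bool.not_true,
        Bool.false_eq_true, if_false]
      rw [show pvStepB ([], parts) t
            = ([] ++ [(PySem.Str.startswith t "\\", PySem.Str.slice t (some 1) none)], parts) by
          simp [pvStepB, h]]
      rw [pvStepB_group]
      simp only [List.nil_append]
      obtain ⟨y, l', hseg⟩ := List.exists_cons_of_ne_nil
        (pvSegFrom_ne_nil ts (PySem.Str.startswith t "\\") (PySem.Str.slice t (some 1) none))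
      have hA : pvFinishA (pvLoopA (t :: ts) [] (parts.foldl (· ++ ·) "") false true)
          = (if PySem.Str.strip (parts.foldl (· ++ ·) "") != ""
             then [(false, PySem.Str.rstrip (parts.foldl (· ++ ·) ""))] else [])
            ++ pvEmitFrom (PySem.Str.startswith t "\\") (PySem.Str.slice t (some 1) none) ts := by
        simp only [pvLoopA, h0, if_true, Bool.not_true, Bool.or_false]
        rw [pvLoopA_emit]
        split <;> simp
      rw [hA, ← pvEmitB_seg ts (PySem.Str.startswith t "\\") (PySem.Str.slice t (some 1) none), hseg]
      cases hL : (y :: l').getLast? with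
      | none => simp at hL
      | some pc => simp [pvEmitB, hL]
    · have hm : pvMark t = false := Bool.eq_false_iff.mpr h
      simp at h
      have h1 : (PySem.Str.startswith t "\\" || PySem.Str.startswith t "/") = false := hm
      simp only [List.any_cons, h1, Bool.false_or, List.foldl_cons]
      rw [show pvStepB ([], parts) t = ([], parts ++ [t]) by simp [pvStepB, h]]
      rw [show pvLoopA (t :: ts) [] (parts.foldl (· ++ ·) "") false true
            = pvLoopA ts [] ((parts ++ [t]).foldl (· ++ ·) "") false true by
          simp only [pvLoopA, h1, Bool.false_eq_true, if_false, List.foldl_append, List.foldl_cons, List.foldl_nil]]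
      exact ih (parts ++ [t])

-- ===== VERDICT (by name: the statement is the Claim_ definition above) =====
theorem assemble_karaoke_lines_py_spec : Claim_equal_assemble_karaoke_lines_py := by
  intro raw_texts _
  unfold Spec_assemble_karaoke_lines_py
  have := pv_main raw_texts []
  simp only [List.foldl_nil] at this
  unfold assemble_karaoke_lines_py assemble_karaoke_lines_py_alt
  exact this
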